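-- pv_equiv track=rewrite | github.com/mbzhu1/blackjack | blackjack.py | special_sum_hand
-- ===== SOURCE A (Python) =====
-- def number(card):
--     # returns number of the card as an integer
--     return card[1]
--
-- def sum_hand_without_ace(player):
--     total = 0
--     for card in player:
--         current = number(card)
--         if current > 10:
--             current = 10
--         total += current
--     return total
--
-- def special_sum_hand(player):
--     hand = []
--     result = []
--     for card in player:
--         hand.append(number(card))
--     result.append(sum_hand_without_ace(player))
--     for numbers in hand:
--         if(numbers == 1):
--             temp = result.pop()
--             result.append(temp)
--             result.append(temp+10)
--     return optimal_sort(result)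
--
-- def optimal_sort(list_of_possible_scores):
--     greater_than_21 = []
--     less_than_21 = []
--     for possible_score in list_of_possible_scores:
--         if(possible_score > 21):
--             greater_than_21.append(possible_score)
--         else:
--             less_than_21.append(possible_score)
--     less_than_21.sort(reverse=True)
--     return less_than_21 + greater_than_21
-- ===== SOURCE B (Python) =====
-- def special_sum_hand(player):
--     aces = base = 0
--     for _, v in player:
--         base += v if v < 10 else 10
--         aces += (v == 1)
--     n = aces + 1
--     k = 0 if base > 21 else min(n, (21 - base) // 10 + 1)
--     return [base + 10 * i for i in range(k - 1, -1, -1)] + [base + 10 * i for i in range(k, n)]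
-- ===== Notes on version B (the rewrite author's own statement) =====
-- stated objective: alternative
-- what changed: B computes (aces, base) in one fold, derives the bust cutoff index k in closed form by floor division ((21-base)//10+1 capped at aces+1), and emits the answer directly as two index walks (k-1 down to 0, then k up to aces): no score list is materialised, no partition pass and no sort is performed, unlike A's build/partition/sort pipeline.
import Mathlib
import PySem

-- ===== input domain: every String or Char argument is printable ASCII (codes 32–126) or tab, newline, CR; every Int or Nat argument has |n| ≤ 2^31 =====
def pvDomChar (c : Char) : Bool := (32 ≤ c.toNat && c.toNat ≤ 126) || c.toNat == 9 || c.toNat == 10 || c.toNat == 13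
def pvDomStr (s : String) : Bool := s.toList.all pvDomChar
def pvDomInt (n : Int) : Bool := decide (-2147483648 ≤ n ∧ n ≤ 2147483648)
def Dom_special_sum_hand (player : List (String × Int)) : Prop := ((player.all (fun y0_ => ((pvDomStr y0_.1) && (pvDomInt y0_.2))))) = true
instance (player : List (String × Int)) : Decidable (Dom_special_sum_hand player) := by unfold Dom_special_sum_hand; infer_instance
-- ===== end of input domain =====

-- B replaces A's build/partition/sort pipeline by one (aces, base) fold, a closed-form bust
-- cutoff index k = min(aces+1, (21-base)//10+1), and two direct index walks (no sort, no filter).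

-- ===== PORT A =====
def pvNumber (card : String × Int) : Int := card.2

def pvSumHandWithoutAce (player : List (String × Int)) : Int :=
  player.foldl (fun total card =>
    let current := pvNumber card
    let current := if current > 10 then 10 else current
    total + current) 0

def pvOptimalSort (list_of_possible_scores : List Int) : List Int :=
  let p := list_of_possible_scores.foldl
    (fun (acc : List Int × List Int) possible_score =>
      if possible_score > 21 then (acc.1 ++ [possible_score], acc.2)
      else (acc.1, acc.2 ++ [possible_score])) ([], [])
  PySem.List.sorted p.2 (fun x => x) true ++ p.1

def special_sum_hand (player : List (String × Int)) : List Int :=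
  let hand := player.foldl (fun h card => h ++ [pvNumber card]) []
  let result := [pvSumHandWithoutAce player]
  let result := hand.foldl (fun (r : List Int) (numbers : Int) =>
    if numbers = 1 then
      match PySem.List.pop? r with
      | some (temp, r') => (r' ++ [temp]) ++ [temp + 10]
      | none => r   -- unreachable: result is never empty (Python would raise)
    else r) result
  pvOptimalSort result

-- ===== PORT B =====
def special_sum_hand_alt (player : List (String × Int)) : List Int :=
  let st := player.foldl (fun (st : Int × Int) c =>
    (st.1 + (if c.2 = 1 then 1 else 0), st.2 + (if c.2 < 10 then c.2 else 10))) (0, 0)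
  let n := st.1 + 1
  let base := st.2
  let k := if base > 21 then (0 : Int) else min n (PySem.Int.floordiv (21 - base) 10 + 1)
  (PySem.List.pyRange (k - 1) (-1) (-1)).map (fun i => base + 10 * i)
    ++ (PySem.List.pyRange k n 1).map (fun i => base + 10 * i)

-- ===== PRECONDITION & SPEC =====
def Spec_special_sum_hand (player : List (String × Int)) (out : List Int) : Prop := out = special_sum_hand_alt player
instance (player : List (String × Int)) (out : List Int) : Decidable (Spec_special_sum_hand player out) := by unfold Spec_special_sum_hand; infer_instance

-- ===== CLAIM (what is proved, stated in full; the proofs are below) =====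
def Claim_equal_special_sum_hand : Prop := ∀ (player : List (String × Int)), Dom_special_sum_hand player → Spec_special_sum_hand player (special_sum_hand player)

-- ===== LEMMAS AND PROOFS =====

-- the arithmetic progression base, base+10, …, base+10*(n-1)
def pvProg (b : Int) (n : Nat) : List Int := List.map (fun (i : Nat) => b + 10 * (i : Int)) (List.range n)

theorem pvProg_succ (b : Int) (n : Nat) :
    pvProg b (n + 1) = pvProg b n ++ [b + 10 * (n : Int)] := by
  simp [pvProg, List.range_succ]

-- A's hand-building fold is map
theorem pv_hand_eq (player : List (String × Int)) (acc : List Int) :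
    player.foldl (fun h card => h ++ [pvNumber card]) acc = acc ++ player.map (·.2) := by
  induction player generalizing acc with
  | nil => simp
  | cons c t ih =>
    rw [List.foldl_cons, ih]
    simp [pvNumber]

-- A's base sum equals the min-capped sum
theorem pv_base_eq (player : List (String × Int)) (acc : Int) :
    player.foldl (fun total card =>
      let current := pvNumber card
      let current := if current > 10 then 10 else current
      total + current) acc
    = player.foldl (fun s c => s + min c.2 10) acc := by
  induction player generalizing acc with
  | nil => rfl
  | cons c t ih =>
    rw [List.foldl_cons, List.foldl_cons, ih]
    congr 1
    simp only [pvNumber]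
    by_cases h : c.2 > 10
    · simp [h]; omega
    · simp [h]; omega

-- B's single pair fold computes the ace count and the min-capped sum
theorem pv_pair_fold (player : List (String × Int)) (a b : Int) :
    player.foldl (fun (st : Int × Int) c =>
      (st.1 + (if c.2 = 1 then 1 else 0), st.2 + (if c.2 < 10 then c.2 else 10))) (a, b)
    = (a + ((player.map (·.2)).countP (· = 1) : Int),
       player.foldl (fun s c => s + min c.2 10) b) := by
  induction player generalizing a b with
  | nil => simp
  | cons c t ih =>
    simp only [List.foldl_cons, List.map_cons, List.countP_cons, ih, Prod.mk.injEq]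
    refine ⟨?_, ?_⟩
    · by_cases h : c.2 = 1 <;> simp [h]; ring
    · congr 1
      by_cases h : c.2 < 10 <;> simp [h] <;> omega

-- A's ace fold extends the progression by one step per ace
theorem pv_ace_fold (l : List Int) (b : Int) (k : Nat) :
    l.foldl (fun (r : List Int) (numbers : Int) =>
      if numbers = 1 then
        match PySem.List.pop? r with
        | some (temp, r') => (r' ++ [temp]) ++ [temp + 10]
        | none => r
      else r) (pvProg b (k + 1))
    = pvProg b (k + 1 + l.countP (· = 1)) := by
  induction l generalizing k with
  | nil => simp
  | cons x t ih =>
    simp only [List.foldl_cons]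
    by_cases hx : x = 1
    · rw [if_pos hx, pvProg_succ, PySem.List.pop?_last]
      show List.foldl _ ((pvProg b k ++ [b + 10 * (k : Int)]) ++ [b + 10 * (k : Int) + 10]) t = _
      have hh : ((pvProg b k ++ [b + 10 * (k : Int)]) ++ [b + 10 * (k : Int) + 10])
          = pvProg b (k + 1 + 1) := by
        simp [pvProg_succ]
        ring_nf
      rw [hh, ih]
      have : (x :: t).countP (· = 1) = t.countP (· = 1) + 1 := by
        simp [hx]
      rw [this]
      congr 1
      omega
    · rw [if_neg hx, ih]
      simp [hx]

-- A's partition fold yields the two filters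
theorem pv_partition_eq (l : List Int) (a1 a2 : List Int) :
    l.foldl (fun (acc : List Int × List Int) s =>
      if s > 21 then (acc.1 ++ [s], acc.2) else (acc.1, acc.2 ++ [s])) (a1, a2)
    = (a1 ++ l.filter (fun s => decide (s > 21)),
       a2 ++ l.filter (fun s => decide (s ≤ 21))) := by
  induction l generalizing a1 a2 with
  | nil => simp
  | cons x t ih =>
    simp only [List.foldl_cons]
    by_cases h : x > 21
    · rw [if_pos h, ih]
      have h2 : ¬ (x ≤ 21) := by omega
      simp [h, h2]
    · rw [if_neg h, ih]
      have h2 : x ≤ 21 := by omega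
      simp [h, h2]

-- the progression split at the cutoff K: the ≤21 filter is the prefix, the >21 filter the suffix
theorem pv_filter_split (b : Int) (N K : Nat) (hKN : K ≤ N)
    (h1 : ∀ i : Nat, i < K → b + 10 * (i : Int) ≤ 21)
    (h2 : ∀ i : Nat, K ≤ i → i < N → 21 < b + 10 * (i : Int)) :
    (pvProg b N).filter (fun s => decide (s ≤ 21)) = pvProg b K ∧
    (pvProg b N).filter (fun s => decide (s > 21))
      = (List.range (N - K)).map (fun j : Nat => b + 10 * ((K : Int) + (j : Int))) := by
  have hsplit : pvProg b N
      = pvProg b K ++ (List.range (N - K)).map (fun j : Nat => b + 10 * ((K : Int) + (j : Int))) := by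
    have : N = K + (N - K) := by omega
    rw [pvProg, this, List.range_add, List.map_append]
    congr 1
    rw [List.map_map]
    have hc : K + (N - K) - K = N - K := by omega
    rw [hc]
    apply List.map_congr_left
    intro j _
    simp [Function.comp]
  rw [hsplit, List.filter_append, List.filter_append]
  have hf1 : (pvProg b K).filter (fun s => decide (s ≤ 21)) = pvProg b K := by
    apply List.filter_eq_self.mpr
    intro x hx
    simp only [pvProg, List.mem_map, List.mem_range] at hx
    obtain ⟨i, hi, rfl⟩ := hx
    simpa using h1 i hi
  have hf2 : (pvProg b K).filter (fun s => decide (s > 21)) = [] := by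
    apply List.filter_eq_nil_iff.mpr
    intro x hx
    simp only [pvProg, List.mem_map, List.mem_range] at hx
    obtain ⟨i, hi, rfl⟩ := hx
    have := h1 i hi
    simp; omega
  have hg1 : ((List.range (N - K)).map (fun j : Nat => b + 10 * ((K : Int) + (j : Int)))).filter
      (fun s => decide (s ≤ 21)) = [] := by
    apply List.filter_eq_nil_iff.mpr
    intro x hx
    simp only [List.mem_map, List.mem_range] at hx
    obtain ⟨j, hj, rfl⟩ := hx
    have := h2 (K + j) (by omega) (by omega)
    push_cast at this
    simp only [decide_eq_true_eq]
    omega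
  have hg2 : ((List.range (N - K)).map (fun j : Nat => b + 10 * ((K : Int) + (j : Int)))).filter
      (fun s => decide (s > 21))
      = (List.range (N - K)).map (fun j : Nat => b + 10 * ((K : Int) + (j : Int))) := by
    apply List.filter_eq_self.mpr
    intro x hx
    simp only [List.mem_map, List.mem_range] at hx
    obtain ⟨j, hj, rfl⟩ := hx
    have := h2 (K + j) (by omega) (by omega)
    push_cast at this
    simp only [decide_eq_true_eq]
    omega
  rw [hf1, hf2, hg1, hg2]
  exact ⟨by simp, by simp⟩

-- the progression is strictly increasing, so sorting it descending is reversing it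
theorem pv_sorted_rev_prog (b : Int) (K : Nat) :
    PySem.List.sorted (pvProg b K) (fun x => x) true = (pvProg b K).reverse := by
  apply PySem.List.sorted_rev_eq_of_perm_of_pairwise_gt
  · exact (pvProg b K).reverse_perm
  · rw [List.pairwise_reverse]
    unfold pvProg
    refine List.Pairwise.map _ (fun i j hij => ?_) (List.pairwise_lt_range)
    omega

-- ===== VERDICT (by name: the statement is the Claim_ definition above) =====
theorem special_sum_hand_spec : Claim_equal_special_sum_hand := by
  intro player _
  show special_sum_hand player = special_sum_hand_alt player
  simp only [special_sum_hand, special_sum_hand_alt, pvSumHandWithoutAce]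
  rw [pv_hand_eq, List.nil_append, pv_base_eq, pv_pair_fold]
  set base := player.foldl (fun s c => s + min c.2 10) (0 : Int) with hbase
  set cnt := (player.map (·.2)).countP (· = 1) with hcnt
  -- A's score list is the progression of length cnt+1
  have hfold := pv_ace_fold (player.map (·.2)) base 0
  rw [Nat.zero_add] at hfold
  have hstart : pvProg base 1 = [base] := by simp [pvProg]
  rw [hstart] at hfold
  rw [hfold, ← hcnt]
  have hc : 1 + cnt = cnt + 1 := Nat.add_comm 1 cnt
  rw [hc]
  unfold pvOptimalSort
  rw [pv_partition_eq]
  simp only [List.nil_append, zero_add]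
  -- the cutoff
  set k : Int := if base > 21 then (0 : Int)
    else min ((cnt : Int) + 1) (PySem.Int.floordiv (21 - base) 10 + 1) with hk
  set K : Nat := k.toNat with hK
  have hq0 : ¬ base > 21 → 0 ≤ PySem.Int.floordiv (21 - base) 10 := by
    intro h
    exact (PySem.Int.le_floordiv_iff_mul_le (a := 21 - base) (b := 10) (q := 0)
      (by omega)).mpr (by omega)
  have hknn : 0 ≤ k := by
    by_cases h : base > 21
    · simp [hk, h]
    · have := hq0 h
      simp [hk, h]
      omega
  have hkK : k = (K : Int) := by omega
  have hKN : K ≤ cnt + 1 := by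
    by_cases h : base > 21
    · simp [hk, h] at hK; omega
    · have : k ≤ (cnt : Int) + 1 := by simp [hk, h]
      omega
  have h1 : ∀ i : Nat, i < K → base + 10 * (i : Int) ≤ 21 := by
    intro i hi
    have hb : ¬ base > 21 := by
      intro h
      simp [hk, h] at hK
      omega
    have hkle : k ≤ PySem.Int.floordiv (21 - base) 10 + 1 := by simp [hk, hb]
    have hiq : (i : Int) ≤ PySem.Int.floordiv (21 - base) 10 := by omega
    have := (PySem.Int.le_floordiv_iff_mul_le (a := 21 - base) (b := 10) (q := (i : Int)) (by omega)).mp hiq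
    omega
  have h2 : ∀ i : Nat, K ≤ i → i < cnt + 1 → 21 < base + 10 * (i : Int) := by
    intro i hKi hiN
    by_cases h : base > 21
    · have : (0 : Int) ≤ 10 * (i : Int) := by positivity
      omega
    · have hkmin : k = min ((cnt : Int) + 1) (PySem.Int.floordiv (21 - base) 10 + 1) := by
        simp [hk, h]
      have hik : k ≤ (i : Int) := by omega
      have hiN' : (i : Int) < (cnt : Int) + 1 := by exact_mod_cast hiN
      have hq : PySem.Int.floordiv (21 - base) 10 + 1 ≤ (i : Int) := by omega
      have hnot : ¬ ((i : Int) ≤ PySem.Int.floordiv (21 - base) 10) := by omega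
      have hmul : ¬ ((i : Int) * 10 ≤ 21 - base) := fun hle =>
        hnot ((PySem.Int.le_floordiv_iff_mul_le
          (a := 21 - base) (b := 10) (q := (i : Int)) (by omega)).mpr hle)
      omega
  obtain ⟨hle, hgt⟩ := pv_filter_split base (cnt + 1) K hKN h1 h2
  rw [hle, hgt, pv_sorted_rev_prog]
  -- the B side: the two ranges are the reversed prefix and the suffix
  congr 1
  · rw [PySem.List.pyRange_neg_one_eq_reverse]
    have h01 : (-1 : Int) + 1 = 0 := by ring
    rw [h01, show k - 1 + 1 = k by ring, hkK, PySem.List.pyRange_zero_natCast,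
      List.map_reverse, List.map_map]
    simp [pvProg, Function.comp_def]
  · rw [PySem.List.pyRange_one]
    rw [List.map_map]
    have hlen : ((cnt : Int) + 1 - k).toNat = cnt + 1 - K := by omega
    rw [hlen]
    apply List.map_congr_left
    intro j _
    simp [hkK]
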